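-- pv_equiv track=rewrite | github.com/whnhch/SAGE | src/diversity/helper.py | chunked_combinations
-- ===== SOURCE A (Python) =====
-- import itertools
--
-- def chunked_combinations(indices, k, chunk_size):
--     """Yield chunks of combinations of size `chunk_size`"""
--     buffer = []
--     for comb in itertools.combinations(indices, k):
--         buffer.append(comb)
--         if len(buffer) == chunk_size:
--             yield buffer
--             buffer = []
--     if buffer:
--         yield buffer
-- ===== SOURCE B (Python) =====
-- import itertools
--
-- def chunked_combinations(indices, k, chunk_size):
--     """Yield chunks of combinations of size `chunk_size`"""
--     it = itertools.combinations(indices, k)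
--     while True:
--         buffer = list(itertools.islice(it, chunk_size))
--         if not buffer:
--             break
--         yield buffer
-- ===== Notes on version B (the rewrite author's own statement) =====
-- stated objective: idiomatic
-- what changed: B keeps the combinations stream as a live iterator and pulls whole batches with itertools.islice, dropping A's per-element append and length comparison; the final short slice is the partial chunk.
-- outside the precondition, e.g. on chunked_combinations([1, 2], 1, 0): A returns [[(1,), (2,)]], B returns []; on chunked_combinations([1], 1, -1): A returns [[(1,)]], B raises ValueError
import Mathlib
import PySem

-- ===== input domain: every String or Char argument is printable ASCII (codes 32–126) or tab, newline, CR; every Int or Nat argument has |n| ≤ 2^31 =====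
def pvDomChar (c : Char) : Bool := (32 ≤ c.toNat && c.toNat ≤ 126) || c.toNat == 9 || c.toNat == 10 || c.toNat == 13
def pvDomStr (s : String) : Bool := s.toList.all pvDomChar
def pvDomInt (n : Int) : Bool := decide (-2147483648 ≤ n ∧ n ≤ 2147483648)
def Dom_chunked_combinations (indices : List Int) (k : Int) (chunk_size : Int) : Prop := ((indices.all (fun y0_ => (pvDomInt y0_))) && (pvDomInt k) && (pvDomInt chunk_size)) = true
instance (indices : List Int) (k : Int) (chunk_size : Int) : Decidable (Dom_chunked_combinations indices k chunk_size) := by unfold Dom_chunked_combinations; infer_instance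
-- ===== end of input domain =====

-- ===== PORT A =====
-- Header: B draws whole chunk_size-sized batches from the combinations stream instead of A's
-- per-element buffer append + length test (idiomatic decomposition; same asymptotic cost).
-- Port of itertools.combinations(indices, k) for k ≥ 0 (combinations in itertools' order);
-- shared by both ports since both Pythons call the same library function.
def combs (k : Nat) (l : List Int) : List (List Int) :=
  match k, l with
  | 0, _ => [[]]
  | _ + 1, [] => []
  | k + 1, x :: xs => (combs k xs).map (fun c => x :: c) ++ combs (k + 1) xs

-- one step of A's loop body: append to buffer, emit when len(buffer) == chunk_size
def stepA (chunk_size : Int) (acc : List (List (List Int)) × List (List Int)) (c : List Int) :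
    List (List (List Int)) × List (List Int) :=
  let buf := acc.2 ++ [c]
  if (buf.length : Int) = chunk_size then (acc.1 ++ [buf], []) else (acc.1, buf)

def chunked_combinations (indices : List Int) (k : Int) (chunk_size : Int) : List (List (List Int)) :=
  let r := (combs k.toNat indices).foldl (stepA chunk_size) ([], [])
  if r.2 ≠ [] then r.1 ++ [r.2] else r.1

-- ===== PORT B =====
-- Source B's while-loop: take an islice of size n; empty slice breaks the loop.
def chunkInto (n : Nat) (l : List (List Int)) : List (List (List Int)) :=
  if h : l.take n = [] then [] else l.take n :: chunkInto n (l.drop n)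
termination_by l.length
decreasing_by
  rw [List.take_eq_nil_iff] at h
  push Not at h
  have h1 : l ≠ [] := h.2
  have h2 : n ≠ 0 := h.1
  have := List.length_pos_of_ne_nil h1
  simp [List.length_drop]
  omega

def chunked_combinations_alt (indices : List Int) (k : Int) (chunk_size : Int) : List (List (List Int)) :=
  chunkInto chunk_size.toNat (combs k.toNat indices)

-- ===== PRECONDITION & SPEC =====
-- Pre_ excludes negative k, where both generators raise ValueError, and chunk_size <= 0, a
-- nonsensical chunk size no caller would specify, where A's single oversized final chunk is an
-- accident of its `len(buffer) == chunk_size` test never firing while B's islice yields nothing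
-- (chunk_size = 0) or raises ValueError (chunk_size < 0).
def Pre_chunked_combinations (indices : List Int) (k : Int) (chunk_size : Int) : Prop :=
  0 ≤ k ∧ 1 ≤ chunk_size
instance (indices : List Int) (k : Int) (chunk_size : Int) : Decidable (Pre_chunked_combinations indices k chunk_size) := by unfold Pre_chunked_combinations; infer_instance

def pvWitness_chunked_combinations : List Int × Int × Int := ([0, 1, 2], 2, 2)

def Spec_chunked_combinations (indices : List Int) (k : Int) (chunk_size : Int) (out : List (List (List Int))) : Prop := out = chunked_combinations_alt indices k chunk_size
instance (indices : List Int) (k : Int) (chunk_size : Int) (out : List (List (List Int))) : Decidable (Spec_chunked_combinations indices k chunk_size out) := by unfold Spec_chunked_combinations; infer_instance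

-- ===== CLAIM (what is proved, stated in full; the proofs are below) =====
def Claim_equal_chunked_combinations : Prop := ∀ (indices : List Int) (k : Int) (chunk_size : Int), Dom_chunked_combinations indices k chunk_size → Pre_chunked_combinations indices k chunk_size → Spec_chunked_combinations indices k chunk_size (chunked_combinations indices k chunk_size)

-- ===== LEMMAS AND PROOFS =====

-- A's fold with a partial buffer emits exactly the chunked partition of buf ++ cs.
lemma foldA_eq (chunk_size : Int) (n : Nat) (hn : 1 ≤ n) (hcn : chunk_size = (n : Int)) :
    ∀ (cs : List (List Int)) (acc : List (List (List Int))) (buf : List (List Int)),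
      buf.length < n →
      (let r := cs.foldl (stepA chunk_size) (acc, buf);
       if r.2 ≠ [] then r.1 ++ [r.2] else r.1)
      = acc ++ chunkInto n (buf ++ cs) := by
  intro cs
  induction cs with
  | nil =>
    intro acc buf hb
    simp only [List.foldl_nil, List.append_nil]
    rw [chunkInto]
    have htake : buf.take n = buf := List.take_of_length_le (le_of_lt hb)
    by_cases hbe : buf = []
    · subst hbe; simp
    · simp only [htake, hbe, dite_false, if_pos hbe]
      rw [chunkInto]
      have : buf.drop n = [] := List.drop_eq_nil_of_le (le_of_lt hb)
      simp [this]
  | cons c cs ih =>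
    intro acc buf hb
    simp only [List.foldl_cons]
    by_cases hfull : ((buf ++ [c]).length : Int) = chunk_size
    · have hlen : (buf ++ [c]).length = n := by
        rw [hcn] at hfull; exact_mod_cast hfull
      have hstep : stepA chunk_size (acc, buf) c = (acc ++ [buf ++ [c]], []) := by
        simp only [List.length_append, List.length_cons, List.length_nil] at hfull
        simp only [stepA]
        rw [if_pos (by omega)]
      rw [hstep, ih (acc ++ [buf ++ [c]]) [] (by simp only [List.length_nil]; omega)]
      have hsplit : buf ++ c :: cs = (buf ++ [c]) ++ cs := by simp
      have htake : ((buf ++ [c]) ++ cs).take n = buf ++ [c] := by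
        rw [← hlen, List.take_left]
      have hdrop : ((buf ++ [c]) ++ cs).drop n = cs := by
        rw [← hlen, List.drop_left]
      have hne : buf ++ [c] ≠ [] := by simp
      have hchunk : chunkInto n (buf ++ c :: cs) = (buf ++ [c]) :: chunkInto n cs := by
        rw [hsplit, chunkInto]
        simp only [htake, hdrop]
        rw [dif_neg hne]
      rw [hchunk]
      simp
    · have hlen : (buf ++ [c]).length < n := by
        rw [hcn] at hfull
        have : (buf ++ [c]).length ≠ n := fun h => hfull (by exact_mod_cast h)
        simp only [List.length_append, List.length_singleton] at this ⊢
        omega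
      have hstep : stepA chunk_size (acc, buf) c = (acc, buf ++ [c]) := by
        simp only [List.length_append, List.length_cons, List.length_nil] at hfull
        simp only [stepA]
        rw [if_neg (by omega)]
      rw [hstep, ih acc (buf ++ [c]) hlen]
      have : (buf ++ [c]) ++ cs = buf ++ c :: cs := by simp
      rw [this]

-- ===== VERDICT (by name: the statement is the Claim_ definition above) =====
theorem chunked_combinations_spec : Claim_equal_chunked_combinations := by
  intro indices k chunk_size _ hpre
  obtain ⟨hk, hc⟩ := hpre
  unfold Spec_chunked_combinations chunked_combinations chunked_combinations_alt
  have hn : 1 ≤ chunk_size.toNat := by omega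
  have hcn : chunk_size = (chunk_size.toNat : Int) := by omega
  have := foldA_eq chunk_size chunk_size.toNat hn hcn (combs k.toNat indices) [] [] (by simp only [List.length_nil]; omega)
  simpa using this
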